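-- pv_equiv track=rewrite | github.com/Z-M-Zero-to-Mastery/DSA-problem_solving | Algorithm/ACMICPCTeam.py | acmTeam
-- ===== SOURCE A (Python) =====
-- def acmTeam(topic):
--     maxsub = 0
--     count = 0
--
--     for i in range(len(topic)):
--         for j in range(i + 1, len(topic)):
--             sub = 0
--
--             # Iterate through the list of topics using zip function to iterate through the list of topics simultaneously
--             # topic[i] = '10101' and topic[j] = '11100' -> zip(topic[i], topic[j]) = [('1', '1'), ('0', '1'), ('1', '1'), ('0', '0'), ('1', '0')]
--             for x, y in zip(topic[i], topic[j]):
--                 if x == "1" or y == "1":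
--                     sub += 1
--
--             if sub > maxsub:
--                 maxsub = sub
--                 count = 1
--             elif sub == maxsub:
--                 count += 1
--
--     return [maxsub, count]
-- ===== SOURCE B (Python) =====
-- def acmTeam(topic):
--     # Precompute one integer bitmask per string (bit k set iff char k == "1") plus its
--     # length; score each pair with a single bitwise OR + popcount (truncated to the
--     # shorter length, matching zip), then aggregate the score list with max/count.
--     masks = []
--     for s in topic:
--         m = 0
--         for c in reversed(s):
--             m = (m << 1) | (c == "1")
--         masks.append((m, len(s)))
--     scores = [bin((mi | mj) & ((1 << min(li, lj)) - 1)).count("1")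
--               for i, (mi, li) in enumerate(masks) for (mj, lj) in masks[i + 1:]]
--     if not scores:
--         return [0, 0]
--     best = max(scores)
--     return [best, scores.count(best)]
-- ===== Notes on version B (the rewrite author's own statement) =====
-- stated objective: alternative
-- what changed: Replaces A's per-pair character zip loop with a precomputed integer bitmask per string (bit k set iff char k is '1'), scoring each pair by one bitwise OR + popcount truncated to the shorter length, then aggregating the collected score list with max/count instead of A's online max/count state machine.
import Mathlib
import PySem

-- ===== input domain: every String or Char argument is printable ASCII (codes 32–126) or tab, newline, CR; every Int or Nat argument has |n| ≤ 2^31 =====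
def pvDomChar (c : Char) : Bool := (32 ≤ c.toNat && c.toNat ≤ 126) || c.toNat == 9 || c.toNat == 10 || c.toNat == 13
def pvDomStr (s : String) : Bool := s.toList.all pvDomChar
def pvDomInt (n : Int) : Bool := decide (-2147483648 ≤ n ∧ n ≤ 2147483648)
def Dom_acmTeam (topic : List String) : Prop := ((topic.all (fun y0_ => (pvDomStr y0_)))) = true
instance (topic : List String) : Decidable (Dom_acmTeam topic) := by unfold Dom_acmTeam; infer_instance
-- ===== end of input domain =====

-- B precomputes one integer bitmask per string and scores each pair by a single bitwise OR + popcount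
-- (instead of A's per-pair character zip loop), then aggregates the score list with max/count (alternative algorithm).
-- ===== PORT A =====
-- A's running max/count update ("if sub > maxsub: ... elif sub == maxsub: ...")
def pvStep (st : Int × Int) (sub : Int) : Int × Int :=
  if st.1 < sub then (sub, 1) else if sub = st.1 then (st.1, st.2 + 1) else st

-- A's inner zip loop: sub starts at 0, +1 whenever x == "1" or y == "1"
def pvScoreA (a b : String) : Int :=
  (a.toList.zip b.toList).foldl
    (fun sub p => if p.1 = '1' ∨ p.2 = '1' then sub + 1 else sub) 0

def acmTeam (topic : List String) : List Int :=
  let n : Int := topic.length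
  let st :=
    (PySem.List.pyRange 0 n 1).foldl (fun (st : Int × Int) i =>
      (PySem.List.pyRange (i + 1) n 1).foldl (fun (st : Int × Int) j =>
        pvStep st (pvScoreA (PySem.List.pyGetD topic i "") (PySem.List.pyGetD topic j "")))
        st)
      (0, 0)
  [st.1, st.2]

-- ===== PORT B =====
-- "m = 0; for c in reversed(s): m = (m << 1) | (c == '1')"
def pvMask (s : String) : Nat :=
  s.toList.reverse.foldl (fun m c => (m <<< 1) ||| (if c = '1' then 1 else 0)) 0

-- exact port of bin(x).count("1") for x ≥ 0 (number of 1 bits in the binary expansion)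
def pvPopcount : Nat → Nat
  | 0 => 0
  | n + 1 => (n + 1) % 2 + pvPopcount ((n + 1) / 2)
decreasing_by omega

-- "bin((mi | mj) & ((1 << min(li, lj)) - 1)).count('1')"
def pvScoreB (p q : Nat × Nat) : Int :=
  (pvPopcount ((p.1 ||| q.1) &&& ((1 <<< min p.2 q.2) - 1)) : Nat)

def acmTeam_alt (topic : List String) : List Int :=
  let masks := topic.map (fun s => (pvMask s, s.toList.length))
  let scores := (PySem.List.enumerate masks).flatMap (fun ip =>
    (PySem.List.slice masks (some (ip.1 + 1)) none).map (fun q => pvScoreB ip.2 q))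
  match PySem.List.max? scores (fun y => y) with
  | none => [0, 0]                                   -- "if not scores: return [0, 0]"
  | some m => [m, (PySem.List.count scores m : Int)] -- "[best, scores.count(best)]"

-- ===== PRECONDITION & SPEC =====
def Spec_acmTeam (topic : List String) (out : List Int) : Prop := out = acmTeam_alt topic
instance (topic : List String) (out : List Int) : Decidable (Spec_acmTeam topic out) := by unfold Spec_acmTeam; infer_instance

-- ===== CLAIM (what is proved, stated in full; the proofs are below) =====
def Claim_equal_acmTeam : Prop := ∀ (topic : List String), Dom_acmTeam topic → Spec_acmTeam topic (acmTeam topic)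

-- ===== LEMMAS AND PROOFS =====

-- foldr characterisation of pvMask: bit k of the mask is position k of the string
def pvMaskL : List Char → Nat
  | [] => 0
  | c :: t => 2 * pvMaskL t + (if c = '1' then 1 else 0)

theorem pv_popcount_zero : pvPopcount 0 = 0 := by rw [pvPopcount]

theorem pv_popcount_step (n : Nat) : pvPopcount n = n % 2 + pvPopcount (n / 2) := by
  cases n with
  | zero => simp [pv_popcount_zero]
  | succ m => rw [pvPopcount]

theorem pv_testBit_zero (x b : Nat) (hb : b ≤ 1) :
    (2 * x + b).testBit 0 = decide (b = 1) := by
  have h : (2 * x + b) % 2 = b := by omega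
  rw [Nat.testBit_zero, h]

theorem pv_testBit_succ (x b i : Nat) (hb : b ≤ 1) :
    (2 * x + b).testBit (i + 1) = x.testBit i := by
  rw [Nat.testBit_succ]
  congr 1
  omega

theorem pv_or_le_one {b1 b2 : Nat} (h1 : b1 ≤ 1) (h2 : b2 ≤ 1) : b1 ||| b2 ≤ 1 := by
  interval_cases b1 <;> interval_cases b2 <;> decide

theorem pv_or_bits (x y b1 b2 : Nat) (h1 : b1 ≤ 1) (h2 : b2 ≤ 1) :
    (2 * x + b1) ||| (2 * y + b2) = 2 * (x ||| y) + (b1 ||| b2) := by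
  apply Nat.eq_of_testBit_eq
  intro i
  cases i with
  | zero =>
    rw [Nat.testBit_or, pv_testBit_zero x b1 h1, pv_testBit_zero y b2 h2,
        pv_testBit_zero (x ||| y) (b1 ||| b2) (pv_or_le_one h1 h2)]
    interval_cases b1 <;> interval_cases b2 <;> decide
  | succ i =>
    rw [Nat.testBit_or, pv_testBit_succ x b1 i h1, pv_testBit_succ y b2 i h2,
        pv_testBit_succ (x ||| y) (b1 ||| b2) i (pv_or_le_one h1 h2), Nat.testBit_or]

theorem pv_two_mul_or (m b : Nat) (hb : b ≤ 1) : (2 * m) ||| b = 2 * m + b := by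
  have := pv_or_bits m 0 0 b (by omega) hb
  simpa using this

theorem pv_mod_two_pow_succ (x b k : Nat) (hb : b ≤ 1) :
    (2 * x + b) % 2 ^ (k + 1) = 2 * (x % 2 ^ k) + b := by
  have hp : 0 < 2 ^ k := Nat.two_pow_pos k
  have hr : x % 2 ^ k < 2 ^ k := Nat.mod_lt x hp
  have h2 : 2 * x % (2 * 2 ^ k) = 2 * (x % 2 ^ k) := Nat.mul_mod_mul_left 2 x (2 ^ k)
  rw [pow_succ, mul_comm (2 ^ k) 2, Nat.add_mod, h2,
      Nat.mod_eq_of_lt (show b < 2 * 2 ^ k by omega)]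
  exact Nat.mod_eq_of_lt (by omega)

theorem pv_mask_eq (s : String) : pvMask s = pvMaskL s.toList := by
  unfold pvMask
  rw [List.foldl_reverse]
  induction s.toList with
  | nil => rfl
  | cons c t ih =>
    rw [List.foldr_cons, ih, pvMaskL]
    have hb : (if c = '1' then 1 else 0) ≤ 1 := by split <;> omega
    rw [Nat.shiftLeft_eq, pow_one, Nat.mul_comm (pvMaskL t) 2, pv_two_mul_or _ _ hb]

theorem pv_score_aux (a b : List Char) :
    pvPopcount ((pvMaskL a ||| pvMaskL b) % 2 ^ (min a.length b.length))
      = ((a.zip b).countP (fun p => p.1 == '1' || p.2 == '1') : Nat) := by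
  induction a generalizing b with
  | nil => simp [pvMaskL, Nat.mod_one, pv_popcount_zero]
  | cons c ta ih =>
    cases b with
    | nil => simp [pvMaskL, Nat.mod_one, pv_popcount_zero]
    | cons d tb =>
      have hbc : (if c = '1' then 1 else 0 : Nat) ≤ 1 := by split <;> omega
      have hbd : (if d = '1' then 1 else 0 : Nat) ≤ 1 := by split <;> omega
      have hor := pv_or_le_one hbc hbd
      simp only [pvMaskL, List.length_cons, List.zip_cons_cons, List.countP_cons]
      rw [show min (ta.length + 1) (tb.length + 1) = min ta.length tb.length + 1 by omega,
          pv_or_bits _ _ _ _ hbc hbd, pv_mod_two_pow_succ _ _ _ hor, pv_popcount_step]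
      have h2 : (2 * ((pvMaskL ta ||| pvMaskL tb) % 2 ^ min ta.length tb.length)
            + ((if c = '1' then 1 else 0) ||| if d = '1' then 1 else 0)) % 2
          = ((if c = '1' then 1 else 0) ||| if d = '1' then 1 else 0) := by omega
      have h3 : (2 * ((pvMaskL ta ||| pvMaskL tb) % 2 ^ min ta.length tb.length)
            + ((if c = '1' then 1 else 0) ||| if d = '1' then 1 else 0)) / 2
          = (pvMaskL ta ||| pvMaskL tb) % 2 ^ min ta.length tb.length := by omega
      rw [h2, h3, ih tb]
      have hbit : ((if c = '1' then 1 else 0 : Nat) ||| if d = '1' then 1 else 0)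
          = if ((c == '1' || d == '1') = true) then 1 else 0 := by
        by_cases hc : c = '1' <;> by_cases hd : d = '1' <;> simp [hc, hd]
      rw [hbit]
      split <;> omega

-- A's per-pair zip loop computes exactly B's masked popcount
theorem pv_score_eq (a b : String) :
    pvScoreA a b = pvScoreB (pvMask a, a.toList.length) (pvMask b, b.toList.length) := by
  unfold pvScoreA pvScoreB
  rw [show (fun (sub : Int) (p : Char × Char) => if p.1 = '1' ∨ p.2 = '1' then sub + 1 else sub)
        = (fun (sub : Int) (p : Char × Char) => if (p.1 == '1' || p.2 == '1') = true then sub + 1 else sub)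
      from by funext sub p; simp]
  rw [PySem.List.foldl_count_if]
  simp only [Nat.shiftLeft_eq, one_mul, Nat.and_two_pow_sub_one_eq_mod,
    pv_mask_eq, pv_score_aux, List.countP_eq_length_filter]
  simp

theorem pv_pyGet?_map {α β : Type} (f : α → β) (l : List α) (i : Int) :
    PySem.List.pyGet? (l.map f) i = (PySem.List.pyGet? l i).map f := by
  simp [PySem.List.pyGet?, PySem.List.pyIdx?]

theorem pv_pyGetD_map {α β : Type} (f : α → β) (l : List α) (i : Int) (d : α) :
    PySem.List.pyGetD (l.map f) i (f d) = f (PySem.List.pyGetD l i d) := by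
  simp only [PySem.List.pyGetD, pv_pyGet?_map]
  cases PySem.List.pyGet? l i <;> rfl

theorem pv_foldl_flatMap {α β : Type} (l : List α) (g : α → List Int)
    (init : β) (f : β → Int → β) :
    l.foldl (fun st x => (g x).foldl f st) init = (l.flatMap g).foldl f init := by
  induction l generalizing init with
  | nil => rfl
  | cons x t ih => simp [List.flatMap_cons, List.foldl_append, ih]

-- A's online fold computes (running max, count of the running max)
theorem pv_agg (l : List Int) (m c : Int) :
    l.foldl pvStep (m, c)
      = (l.foldl max m,
         if l.foldl max m = m then c + l.count m else l.count (l.foldl max m)) := by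
  induction l generalizing m c with
  | nil => simp
  | cons s t ih =>
    simp only [List.foldl_cons]
    rcases lt_trichotomy m s with h1 | h1 | h1
    · have hps : pvStep (m, c) s = (s, 1) := by simp [pvStep, h1]
      rw [hps, ih, max_eq_right h1.le]
      have hMs : s ≤ t.foldl max s := (PySem.List.le_foldl_max t s).1
      have hne : ¬ t.foldl max s = m := by omega
      simp only [Prod.mk.injEq, hne, if_false, List.count_cons, beq_iff_eq, true_and]
      by_cases h2 : t.foldl max s = s
      · simp only [h2]
        push_cast
        omega
      · have h2' : ¬ s = t.foldl max s := fun h => h2 h.symm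
        simp only [h2, if_false, h2']
        push_cast
        omega
    · subst h1
      have hps : pvStep (m, c) m = (m, c + 1) := by simp [pvStep]
      rw [hps, ih, max_self]
      have hMs : m ≤ t.foldl max m := (PySem.List.le_foldl_max t m).1
      simp only [Prod.mk.injEq, List.count_cons, beq_iff_eq, true_and]
      by_cases h2 : t.foldl max m = m
      · simp only [h2]
        push_cast
        omega
      · have h2' : ¬ m = t.foldl max m := fun h => h2 h.symm
        simp only [h2, if_false, h2']
        push_cast
        omega
    · have hps : pvStep (m, c) s = (m, c) := by simp [pvStep, h1.not_gt, h1.ne]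
      rw [hps, ih, max_eq_left h1.le]
      have hMs : m ≤ t.foldl max m := (PySem.List.le_foldl_max t m).1
      simp only [Prod.mk.injEq, List.count_cons, beq_iff_eq, true_and]
      by_cases h2 : t.foldl max m = m
      · have hsm : ¬ s = m := h1.ne
        simp only [h2, hsm]
        push_cast
        omega
      · have hsM : ¬ s = t.foldl max m := by omega
        simp only [h2, if_false, hsM]
        push_cast
        omega

-- the pair-score list A traverses equals the one B builds from the mask table
theorem pv_scores_eq (topic : List String) :
    (PySem.List.pyRange 0 (topic.length : Int) 1).flatMap (fun i =>
        (PySem.List.pyRange (i + 1) (topic.length : Int) 1).map (fun j =>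
          pvScoreA (PySem.List.pyGetD topic i "") (PySem.List.pyGetD topic j "")))
      = (PySem.List.enumerate (topic.map (fun s => (pvMask s, s.toList.length)))).flatMap (fun ip =>
          (PySem.List.slice (topic.map (fun s => (pvMask s, s.toList.length))) (some (ip.1 + 1)) none).map
            (fun q => pvScoreB ip.2 q)) := by
  rw [PySem.List.enumerate_eq_map_pyRange (topic.map (fun s => (pvMask s, s.toList.length))) ((0 : Nat), (0 : Nat)),
      List.flatMap_map]
  simp only [PySem.List.len, List.length_map]
  apply List.flatMap_congr
  intro i hi
  have h0 : 0 ≤ i := ((PySem.List.mem_pyRange_one).1 (by simpa using hi)).1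
  have h1 : (0 : Int) ≤ i + 1 := by omega
  have hget : PySem.List.pyGetD (topic.map (fun s => (pvMask s, s.toList.length))) i ((0 : Nat), (0 : Nat))
      = (pvMask (PySem.List.pyGetD topic i ""), (PySem.List.pyGetD topic i "").toList.length) := by
    have := pv_pyGetD_map (fun s => (pvMask s, s.toList.length)) topic i ""
    simpa [pvMask] using this
  rw [hget, PySem.List.slice_from _ h1,
      show (PySem.List.pyRange (i + 1) (topic.length : Int) 1).map (fun j =>
          pvScoreA (PySem.List.pyGetD topic i "") (PySem.List.pyGetD topic j ""))
        = ((PySem.List.pyRange (i + 1) (topic.length : Int) 1).map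
            (fun j => PySem.List.pyGetD topic j "")).map
          (pvScoreA (PySem.List.pyGetD topic i "")) from by rw [List.map_map]; rfl,
      PySem.List.map_pyGetD_pyRange' topic "" h1, ← List.map_drop, List.map_map]
  apply List.map_congr_left
  intro b _
  exact pv_score_eq _ b

theorem pv_scores_nonneg (topic : List String) :
    ∀ x ∈ (PySem.List.enumerate (topic.map (fun s => (pvMask s, s.toList.length)))).flatMap (fun ip =>
        (PySem.List.slice (topic.map (fun s => (pvMask s, s.toList.length))) (some (ip.1 + 1)) none).map
          (fun q => pvScoreB ip.2 q)),
      0 ≤ x := by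
  intro x hx
  simp only [List.mem_flatMap, List.mem_map] at hx
  obtain ⟨ip, _, q, _, rfl⟩ := hx
  unfold pvScoreB
  positivity

-- ===== VERDICT (by name: the statement is the Claim_ definition above) =====
theorem acmTeam_spec : Claim_equal_acmTeam := by
  intro topic _
  unfold Spec_acmTeam acmTeam acmTeam_alt
  have hfold :
      (PySem.List.pyRange 0 (topic.length : Int) 1).foldl (fun (st : Int × Int) i =>
        (PySem.List.pyRange (i + 1) (topic.length : Int) 1).foldl (fun (st : Int × Int) j =>
          pvStep st (pvScoreA (PySem.List.pyGetD topic i "") (PySem.List.pyGetD topic j "")))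
          st) (0, 0)
      = ((PySem.List.enumerate (topic.map (fun s => (pvMask s, s.toList.length)))).flatMap (fun ip =>
          (PySem.List.slice (topic.map (fun s => (pvMask s, s.toList.length))) (some (ip.1 + 1)) none).map
            (fun q => pvScoreB ip.2 q))).foldl pvStep (0, 0) := by
    rw [PySem.List.foldl_congr_mem' _ _
        (fun (st : Int × Int) i =>
          ((PySem.List.pyRange (i + 1) (topic.length : Int) 1).map (fun j =>
            pvScoreA (PySem.List.pyGetD topic i "") (PySem.List.pyGetD topic j ""))).foldl
            pvStep st)
        (0, 0) (by intro i _ st; simp only [List.foldl_map]),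
      pv_foldl_flatMap, pv_scores_eq topic]
  simp only [hfold]
  have hnn := pv_scores_nonneg topic
  cases hsc : (PySem.List.enumerate (topic.map (fun s => (pvMask s, s.toList.length)))).flatMap (fun ip =>
      (PySem.List.slice (topic.map (fun s => (pvMask s, s.toList.length))) (some (ip.1 + 1)) none).map
        (fun q => pvScoreB ip.2 q)) with
  | nil => simp [PySem.List.max?]
  | cons s t =>
    rw [hsc] at hnn
    have hs0 : 0 ≤ s := hnn s (by simp)
    rw [PySem.List.max?_id_cons, pv_agg]
    have hM : (s :: t).foldl max 0 = t.foldl max s := by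
      simp only [List.foldl_cons]
      rw [show max (0 : Int) s = s from max_eq_right hs0]
    simp only [hM, PySem.List.count_eq]
    by_cases h0 : t.foldl max s = 0
    · simp [h0]
    · simp [h0]
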